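-- pv_equiv track=rewrite | github.com/szczys/qr-code | qr-grid-generator.py | getAlignmentDict
-- ===== SOURCE A (Python) =====
-- def getAlignmentDict(qrVersion,tabooDict):
--     alignmentLocs = (
--         (), #There is no version 0
--         (), #Version 1 has no alignment symbol
--         (6,18),
--         (6,22),
--         (6,26),
--         (6,30),
--         (6,34),
--         (6,22,38),
--         (6,24,42),
--         (6,26,46),
--         (6,28,50),
--         (6,30,54),
--         (6,32,58),
--         (6,34,62),
--         (6,26,46,66),
--         (6,26,48,70),
--         (6,26,50,74),
--         (6,30,54,78),
--         (6,30,56,82),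
--         (6,30,58,86),
--         (6,34,62,90),
--         (6,28,50,72,94),
--         (6,26,50,74,98),
--         (6,30,54,78,102),
--         (6,28,54,80,106),
--         (6,32,58,84,110),
--         (6,30,58,86,114),
--         (6,34,62,90,118),
--         (6,26,50,74,98,122),
--         (6,30,54,78,102,126),
--         (6,26,52,78,104,130),
--         (6,30,56,82,108,134),
--         (6,34,60,86,112,138),
--         (6,30,58,86,114,142),
--         (6,34,62,90,118,146),
--         (6,30,54,78,102,126,150),
--         (6,24,50,76,102,128,154),
--         (6,28,54,80,106,132,158),
--         (6,32,58,84,110,136,162),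
--         (6,26,54,82,110,138,166),
--         (6,30,58,86,114,142,170)
--     )
--     alignmentDict = {}
--     for centerX in alignmentLocs[qrVersion]:
--         for centerY in alignmentLocs [qrVersion]:
--             patternOutOfBounds = False
--             curPattern = {}
--             for x in range(centerX-2,centerX+3):
--                 for y in range(centerY-2,centerY+3):
--                     '''
--                     #most pixels are black:
--                     thisPixel = 1
--                     #but some pixels are white:
--                     if ((centerX-2<x<centerX+2) and (centerY-2<y<centerY+2)):
--                         #don't change the center pixel:
--                         if ((x!=centerX) and (y!=centerY)):
--                             thisPixel = 0
--                     '''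
--                     #start with white pixels:
--                     thisPixel = 0
--                     #change outer ring to black pixels:
--                     if ((x==centerX-2) or (x==centerX+2) or (y==centerY-2) or (y==centerY+2)):
--                         thisPixel = 1
--                     #change center pixel to black:
--                     elif ((x == centerX) and (y == centerY)):
--                         thisPixel = 1
--
--                     curPattern[x,y] = thisPixel
--
--                     #make sure not to add this pattern if it overlaps other features:
--                     if ((x,y) in tabooDict.keys()):
--                         patternOutOfBounds = True
--
--             if not patternOutOfBounds:
--                 alignmentDict.update(curPattern)
--
--     return alignmentDict
-- ===== SOURCE B (Python) =====
-- def getAlignmentDict(qrVersion, tabooDict):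
--     alignmentLocs = (
--         (), (),
--         (6,18),(6,22),(6,26),(6,30),(6,34),
--         (6,22,38),(6,24,42),(6,26,46),(6,28,50),(6,30,54),(6,32,58),(6,34,62),
--         (6,26,46,66),(6,26,48,70),(6,26,50,74),(6,30,54,78),(6,30,56,82),(6,30,58,86),(6,34,62,90),
--         (6,28,50,72,94),(6,26,50,74,98),(6,30,54,78,102),(6,28,54,80,106),(6,32,58,84,110),(6,30,58,86,114),(6,34,62,90,118),
--         (6,26,50,74,98,122),(6,30,54,78,102,126),(6,26,52,78,104,130),(6,30,56,82,108,134),(6,34,60,86,112,138),(6,30,58,86,114,142),(6,34,62,90,118,146),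
--         (6,30,54,78,102,126,150),(6,24,50,76,102,128,154),(6,28,54,80,106,132,158),(6,32,58,84,110,136,162),(6,26,54,82,110,138,166),(6,30,58,86,114,142,170)
--     )
--     locs = alignmentLocs[qrVersion]
--     # stage 1: keep only centers whose 5x5 box contains no taboo key
--     # (geometric test: a taboo key (tx,ty) lies in the box iff |tx-cx|<=2 and |ty-cy|<=2)
--     good = [(cx, cy) for cx in locs for cy in locs
--             if not any(abs(tx - cx) <= 2 and abs(ty - cy) <= 2 for (tx, ty) in tabooDict)]
--     # stage 2: paint all surviving patterns in one dict comprehension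
--     # (pixel is black iff it is on the outer ring -- Chebyshev distance 2 -- or the center)
--     return {(cx + dx, cy + dy): (1 if max(abs(dx), abs(dy)) == 2 or (dx, dy) == (0, 0) else 0)
--             for (cx, cy) in good for dx in range(-2, 3) for dy in range(-2, 3)}
-- ===== Notes on version B (the rewrite author's own statement) =====
-- stated objective: simpler
-- what changed: A builds each 5x5 pattern dict pixel by pixel inside four nested loops while simultaneously testing every pixel for taboo membership and conditionally merging; B works in two staged passes: it first filters the centers with a geometric test (a taboo key collides iff it is within Chebyshev distance 2 of the center, scanning the taboo dict instead of the 25 pixels) and then paints all surviving patterns in a single dict comprehension using the Chebyshev ring-or-center pixel rule.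
import Mathlib
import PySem

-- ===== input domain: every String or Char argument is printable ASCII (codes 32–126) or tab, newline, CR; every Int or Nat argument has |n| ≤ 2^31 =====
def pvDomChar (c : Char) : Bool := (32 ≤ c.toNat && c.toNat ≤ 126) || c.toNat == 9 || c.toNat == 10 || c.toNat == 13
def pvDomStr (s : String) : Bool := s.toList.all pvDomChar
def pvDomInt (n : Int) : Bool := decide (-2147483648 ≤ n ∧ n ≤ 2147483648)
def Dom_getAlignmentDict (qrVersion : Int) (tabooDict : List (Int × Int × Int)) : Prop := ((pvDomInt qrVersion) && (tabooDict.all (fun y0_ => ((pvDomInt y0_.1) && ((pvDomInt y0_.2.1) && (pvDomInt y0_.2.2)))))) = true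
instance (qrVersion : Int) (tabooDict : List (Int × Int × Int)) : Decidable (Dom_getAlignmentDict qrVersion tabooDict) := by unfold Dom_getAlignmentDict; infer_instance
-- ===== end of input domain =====

-- B replaces A's build-test-merge nested loops by two staged passes: a geometric filter of the
-- centers (a taboo key collides iff it lies within Chebyshev distance 2 of the center) followed by
-- one dict comprehension painting all surviving patterns (objective: simpler). Return value only.

-- ===== PORT A =====
-- the alignmentLocs tuple-of-tuples (identical in Source A and Source B; shared data constant)
def pvAlignLocs : List (List Int) :=
  [ [], [],
    [6,18], [6,22], [6,26], [6,30], [6,34],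
    [6,22,38], [6,24,42], [6,26,46], [6,28,50], [6,30,54], [6,32,58], [6,34,62],
    [6,26,46,66], [6,26,48,70], [6,26,50,74], [6,30,54,78], [6,30,56,82], [6,30,58,86], [6,34,62,90],
    [6,28,50,72,94], [6,26,50,74,98], [6,30,54,78,102], [6,28,54,80,106], [6,32,58,84,110], [6,30,58,86,114], [6,34,62,90,118],
    [6,26,50,74,98,122], [6,30,54,78,102,126], [6,26,52,78,104,130], [6,30,56,82,108,134], [6,34,60,86,112,138], [6,30,58,86,114,142], [6,34,62,90,118,146],
    [6,30,54,78,102,126,150], [6,24,50,76,102,128,154], [6,28,54,80,106,132,158], [6,32,58,84,110,136,162], [6,26,54,82,110,138,166], [6,30,58,86,114,142,170] ]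

-- '(x,y) in tabooDict.keys()': the dict's pair keys are the first two components of each triple
def tabooHasKey (tabooDict : List (Int × Int × Int)) (k : Int × Int) : Bool :=
  tabooDict.any (fun e => e.1 == k.1 && e.2.1 == k.2)

def getAlignmentDict (qrVersion : Int) (tabooDict : List (Int × Int × Int)) : List (Int × Int × Int) :=
  -- alignmentLocs[qrVersion] raises IndexError outside Pre_ (pyGet? = none there; .getD [] is unreached inside Pre_)
  let d : PySem.Dict (Int × Int) Int :=
    ((PySem.List.pyGet? pvAlignLocs qrVersion).getD []).foldl (fun acc centerX =>
      ((PySem.List.pyGet? pvAlignLocs qrVersion).getD []).foldl (fun acc centerY =>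
        -- inner double loop carries (curPattern, patternOutOfBounds) as the state
        let st :=
          (PySem.List.pyRange (centerX-2) (centerX+3)).foldl (fun (s : PySem.Dict (Int × Int) Int × Bool) x =>
            (PySem.List.pyRange (centerY-2) (centerY+3)).foldl (fun s y =>
              (s.1.insert (x, y)
                 (if x = centerX-2 ∨ x = centerX+2 ∨ y = centerY-2 ∨ y = centerY+2 then (1:Int)
                  else if x = centerX ∧ y = centerY then 1 else 0),
               if tabooHasKey tabooDict (x, y) then true else s.2)) s)
            (PySem.Dict.empty, false)
        if !st.2 then acc.update st.1.items else acc) acc) PySem.Dict.empty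
  d.items.map (fun e => (e.1.1, e.1.2, e.2))

-- ===== PORT B =====
def getAlignmentDict_alt (qrVersion : Int) (tabooDict : List (Int × Int × Int)) : List (Int × Int × Int) :=
  let locs := (PySem.List.pyGet? pvAlignLocs qrVersion).getD []
  -- stage 1: geometric filter of the centers against the taboo keys
  let good := (locs.flatMap (fun cx => locs.map (fun cy => (cx, cy)))).filter
      (fun c => !(tabooDict.any (fun e =>
          decide ((e.1 - c.1).natAbs ≤ 2) && decide ((e.2.1 - c.2).natAbs ≤ 2))))
  -- stage 2: one dict comprehension over all surviving patterns' pixels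
  let pixels := good.flatMap (fun c =>
      (PySem.List.pyRange (-2) 3).flatMap (fun dx =>
        (PySem.List.pyRange (-2) 3).map (fun dy =>
          ((c.1 + dx, c.2 + dy),
           if max dx.natAbs dy.natAbs = 2 ∨ (dx = 0 ∧ dy = 0) then (1:Int) else 0))))
  let d := pixels.foldl (fun (d : PySem.Dict (Int × Int) Int) e => d.insert e.1 e.2) PySem.Dict.empty
  d.items.map (fun e => (e.1.1, e.1.2, e.2))

-- ===== PRECONDITION & SPEC =====
-- Pre_ excludes exactly the versions where alignmentLocs[qrVersion] raises IndexError (Python negative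
-- indices down to -41 wrap around and return normally, so they are inside Pre_).
def Pre_getAlignmentDict (qrVersion : Int) (tabooDict : List (Int × Int × Int)) : Prop :=
  -41 ≤ qrVersion ∧ qrVersion ≤ 40
instance (qrVersion : Int) (tabooDict : List (Int × Int × Int)) : Decidable (Pre_getAlignmentDict qrVersion tabooDict) := by unfold Pre_getAlignmentDict; infer_instance
def pvWitness_getAlignmentDict : Int × (List (Int × Int × Int)) := (2, [(6, 6, 1)])

def Spec_getAlignmentDict (qrVersion : Int) (tabooDict : List (Int × Int × Int)) (out : List (Int × Int × Int)) : Prop := out = getAlignmentDict_alt qrVersion tabooDict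
instance (qrVersion : Int) (tabooDict : List (Int × Int × Int)) (out : List (Int × Int × Int)) : Decidable (Spec_getAlignmentDict qrVersion tabooDict out) := by unfold Spec_getAlignmentDict; infer_instance

-- ===== CLAIM (what is proved, stated in full; the proofs are below) =====
def Claim_equal_getAlignmentDict : Prop := ∀ (qrVersion : Int) (tabooDict : List (Int × Int × Int)), Dom_getAlignmentDict qrVersion tabooDict → Pre_getAlignmentDict qrVersion tabooDict → Spec_getAlignmentDict qrVersion tabooDict (getAlignmentDict qrVersion tabooDict)

-- ===== LEMMAS AND PROOFS =====

def pvDs : List Int := [-2, -1, 0, 1, 2]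
theorem pvRange5 (c : Int) : PySem.List.pyRange (c-2) (c+3) = pvDs.map (fun d => c + d) := by
  rw [PySem.List.pyRange_one_cons (by omega), PySem.List.pyRange_one_cons (by omega),
      PySem.List.pyRange_one_cons (by omega), PySem.List.pyRange_one_cons (by omega),
      PySem.List.pyRange_one_cons (by omega)]
  have h : PySem.List.pyRange (c-2+1+1+1+1+1) (c+3) = [] := by
    simp [PySem.List.pyRange]; omega
  rw [h]; simp [pvDs]; omega

theorem pvFoldOr (l : List Int) (f : Int → Bool) (b0 : Bool) :
    l.foldl (fun b y => b || f y) b0 = (b0 || l.any f) := by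
  induction l generalizing b0 with
  | nil => simp
  | cons h t ih => simp [List.foldl, ih, Bool.or_assoc]

-- B's per-center pixel list (the inner two comprehension loops of the dict comprehension)
def pvPix (cx cy : Int) : List ((Int × Int) × Int) :=
  (PySem.List.pyRange (-2) 3).flatMap (fun dx =>
    (PySem.List.pyRange (-2) 3).map (fun dy =>
      ((cx + dx, cy + dy),
       if max dx.natAbs dy.natAbs = 2 ∨ (dx = 0 ∧ dy = 0) then (1:Int) else 0)))

-- pixel rule equivalence: A's ring-or-center conditional = B's Chebyshev rule
theorem pvPixEq (cx cy dx dy : Int) (hdx : dx.natAbs ≤ 2) (hdy : dy.natAbs ≤ 2) :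
    (if cx+dx = cx-2 ∨ cx+dx = cx+2 ∨ cy+dy = cy-2 ∨ cy+dy = cy+2 then (1:Int)
     else if cx+dx = cx ∧ cy+dy = cy then 1 else 0)
  = (if max dx.natAbs dy.natAbs = 2 ∨ (dx = 0 ∧ dy = 0) then 1 else 0) := by
  split_ifs <;> omega

-- the flag of A's inner double loop = B's geometric overlap test
theorem pvFlagEq (t : List (Int × Int × Int)) (cx cy : Int) :
    ((pvDs.map (fun d => cx + d)).foldl (fun b x =>
       (pvDs.map (fun d => cy + d)).foldl (fun b y => b || tabooHasKey t (x, y)) b) false)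
  = t.any (fun e => decide ((e.1 - cx).natAbs ≤ 2) && decide ((e.2.1 - cy).natAbs ≤ 2)) := by
  simp only [List.foldl_map, pvFoldOr, Bool.false_or]
  rw [Bool.eq_iff_iff]
  simp only [List.any_eq_true, tabooHasKey, Bool.and_eq_true, beq_iff_eq,
    decide_eq_true_eq, pvDs]
  constructor
  · rintro ⟨dx, hdx, dy, hdy, e, he, h1, h2⟩
    simp only [List.mem_cons, List.not_mem_nil, or_false] at hdx hdy
    exact ⟨e, he, by omega, by omega⟩
  · rintro ⟨e, he, h1, h2⟩
    refine ⟨e.1 - cx, by simp only [List.mem_cons, List.not_mem_nil, or_false]; omega,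
            e.2.1 - cy, by simp only [List.mem_cons, List.not_mem_nil, or_false]; omega,
            e, he, by ring, by ring⟩

-- A's per-center pattern dict items = B's pixel list
theorem pvPatEq (cx cy : Int) :
    (((pvDs.map (fun d => cx + d)).foldl (fun (d : PySem.Dict (Int × Int) Int) x =>
        (pvDs.map (fun d => cy + d)).foldl (fun d y =>
          d.insert (x, y)
            (if x = cx-2 ∨ x = cx+2 ∨ y = cy-2 ∨ y = cy+2 then (1:Int)
             else if x = cx ∧ y = cy then 1 else 0)) d) PySem.Dict.empty).items)
  = pvPix cx cy := by
  have h1 : ((pvDs.map (fun d => cx + d)).foldl (fun (d : PySem.Dict (Int × Int) Int) x =>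
        (pvDs.map (fun d => cy + d)).foldl (fun d y =>
          d.insert (x, y)
            (if x = cx-2 ∨ x = cx+2 ∨ y = cy-2 ∨ y = cy+2 then (1:Int)
             else if x = cx ∧ y = cy then 1 else 0)) d) PySem.Dict.empty)
      = ((pvDs.map (fun d => cx + d)).flatMap (fun x => (pvDs.map (fun d => cy + d)).map (fun y =>
           ((x, y), (if x = cx-2 ∨ x = cx+2 ∨ y = cy-2 ∨ y = cy+2 then (1:Int)
             else if x = cx ∧ y = cy then 1 else 0))))).foldl
          (fun (d : PySem.Dict (Int × Int) Int) e => d.insert e.1 e.2) PySem.Dict.empty := by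
    simp only [List.foldl_flatMap, List.foldl_map]
  rw [h1]
  rw [PySem.Dict.items_foldl_insert_fresh _ Prod.fst Prod.snd PySem.Dict.empty
      (fun a _ => PySem.Dict.contains_empty a.1) ?nodup]
  case nodup =>
    simp [pvDs, Prod.mk.injEq]
  rw [show (PySem.Dict.empty : PySem.Dict (Int × Int) Int).items = [] from rfl, List.nil_append]
  have hds : PySem.List.pyRange (-2) 3 = pvDs := by decide
  simp only [pvPix, hds, List.map_flatMap, List.map_map, List.flatMap_map]
  refine List.flatMap_congr (fun dx hdx => ?_)
  refine List.map_congr_left (fun dy hdy => ?_)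
  simp only [pvDs, List.mem_cons, List.not_mem_nil, or_false] at hdx hdy
  simp only [Function.comp, Prod.mk.injEq]
  exact ⟨trivial, pvPixEq cx cy dx dy (by omega) (by omega)⟩

theorem pvIfTrue (c b : Bool) : (if c = true then true else b) = (b || c) := by
  cases c <;> simp

theorem pvProdFold2 {σ₁ σ₂ : Type} (f : σ₁ → Int → Int → σ₁) (g : σ₂ → Int → Int → σ₂)
    (xs ys : List Int) (a : σ₁) (b : σ₂) :
    xs.foldl (fun s x => ys.foldl (fun s y => (f s.1 x y, g s.2 x y)) s) (a, b)
  = (xs.foldl (fun d x => ys.foldl (fun d y => f d x y) d) a,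
     xs.foldl (fun e x => ys.foldl (fun e y => g e x y) e) b) := by
  induction xs generalizing a b with
  | nil => rfl
  | cons hX tX ih =>
    simp only [List.foldl_cons]
    rw [PySem.List.foldl_prod_mk (fun d y => f d hX y) (fun e y => g e hX y) ys a b, ih]

-- A's per-center step, rewritten into B's per-center shape
theorem pvCenterEq (t : List (Int × Int × Int)) (cx cy : Int) (acc : PySem.Dict (Int × Int) Int) :
    (if !((PySem.List.pyRange (cx-2) (cx+3)).foldl (fun (s : PySem.Dict (Int × Int) Int × Bool) x =>
            (PySem.List.pyRange (cy-2) (cy+3)).foldl (fun s y =>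
              (s.1.insert (x, y)
                 (if x = cx-2 ∨ x = cx+2 ∨ y = cy-2 ∨ y = cy+2 then (1:Int)
                  else if x = cx ∧ y = cy then 1 else 0),
               if tabooHasKey t (x, y) then true else s.2)) s)
            (PySem.Dict.empty, false)).2
     then acc.update ((PySem.List.pyRange (cx-2) (cx+3)).foldl (fun (s : PySem.Dict (Int × Int) Int × Bool) x =>
            (PySem.List.pyRange (cy-2) (cy+3)).foldl (fun s y =>
              (s.1.insert (x, y)
                 (if x = cx-2 ∨ x = cx+2 ∨ y = cy-2 ∨ y = cy+2 then (1:Int)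
                  else if x = cx ∧ y = cy then 1 else 0),
               if tabooHasKey t (x, y) then true else s.2)) s)
            (PySem.Dict.empty, false)).1.items
     else acc)
  = (if !(t.any (fun e => decide ((e.1 - cx).natAbs ≤ 2) && decide ((e.2.1 - cy).natAbs ≤ 2)))
     then acc.update (pvPix cx cy)
     else acc) := by
  rw [pvRange5 cx, pvRange5 cy]
  simp only [pvIfTrue]
  rw [pvProdFold2 (fun (d : PySem.Dict (Int × Int) Int) x y => d.insert (x, y)
        (if x = cx-2 ∨ x = cx+2 ∨ y = cy-2 ∨ y = cy+2 then (1:Int)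
         else if x = cx ∧ y = cy then 1 else 0))
      (fun b x y => b || tabooHasKey t (x, y))]
  rw [pvFlagEq t cx cy, pvPatEq cx cy]

-- B's foldl-of-insert over a pixel block is Dict.update with that block
theorem pvUpdateEq (acc : PySem.Dict (Int × Int) Int) (l : List ((Int × Int) × Int)) :
    l.foldl (fun (d : PySem.Dict (Int × Int) Int) e => d.insert e.1 e.2) acc = acc.update l := by
  rfl

-- B's nested per-pattern insert loops are Dict.update with that pattern's pixel list
theorem pvPixFold (cx cy : Int) (acc : PySem.Dict (Int × Int) Int) :
    (PySem.List.pyRange (-2) 3).foldl (fun acc dx =>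
      (PySem.List.pyRange (-2) 3).foldl (fun (d : PySem.Dict (Int × Int) Int) dy =>
        d.insert (cx + dx, cy + dy)
          (if max dx.natAbs dy.natAbs = 2 ∨ (dx = 0 ∧ dy = 0) then (1:Int) else 0)) acc) acc
  = acc.update (pvPix cx cy) := by
  rw [← pvUpdateEq]
  simp only [pvPix, List.foldl_flatMap, List.foldl_map]

-- ===== VERDICT (by name: the statement is the Claim_ definition above) =====
theorem getAlignmentDict_spec : Claim_equal_getAlignmentDict := by
  intro q t _ _
  unfold Spec_getAlignmentDict getAlignmentDict getAlignmentDict_alt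
  simp only [pvCenterEq, List.foldl_flatMap, List.foldl_map,
    ← PySem.List.foldl_if_eq_foldl_filter, pvPixFold]
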